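-- pv_equiv track=rewrite | github.com/aPerezCarrillo/MapReduceWordCount | src/driver.py | group_number_indexes
-- ===== SOURCE A (Python) =====
-- from typing import List, Dict, Union, Tuple
--
-- def group_number_indexes(nums: List[int], k: int) -> List[List[int]]:
--     """
--     Group numbers into k groups based on their sizes, aiming to balance the sums of the groups.
--
--     Args:
--         nums (List[int]): A list of numbers to be grouped.
--         k (int): The number of groups to create.
--
--     Returns:
--         List[List[int]]: A list of groups, where each group contains the indexes of the original numbers.
--     """
--     # Sort the numbers in descending order while keeping track of their original indexes
--     indexed_nums = sorted(enumerate(nums), key=lambda x: x[1], reverse=True)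
--
--     # Initialize groups and their sums
--     groups = [[] for _ in range(k)]
--     group_sums = [0] * k
--
--     # Distribute numbers into groups
--     for index, num in indexed_nums:
--         # Find the group with the smallest sum
--         min_group_index = group_sums.index(min(group_sums))
--
--         # Add the index of the number to that group
--         groups[min_group_index].append(index)
--         group_sums[min_group_index] += num
--
--     return groups
-- ===== SOURCE B (Python) =====
-- def group_number_indexes(nums, k):
--     # Sorted priority queue of (sum, group) pairs replaces the per-item
--     # min()+index() scan of the sums list: pop the head, reinsert in order.
--     indexed_nums = sorted(enumerate(nums), key=lambda x: x[1], reverse=True)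
--     groups = [[] for _ in range(k)]
--     queue = [(0, g) for g in range(k)]  # ascending by (sum, group index)
--     for index, num in indexed_nums:
--         s, g = queue[0]
--         queue = queue[1:]
--         groups[g].append(index)
--         new = (s + num, g)
--         pos = 0
--         while pos < len(queue) and queue[pos] < new:
--             pos += 1
--         queue.insert(pos, new)
--     return groups
-- ===== Notes on version B (the rewrite author's own statement) =====
-- stated objective: alternative
-- what changed: Replaces the per-item min()+index() double scan of the sums list by a priority queue kept as a list sorted ascending by (sum, group index): pop the head, append, reinsert the updated pair in order.
-- outside the precondition, e.g. on group_number_indexes([1], 0): A raises ValueError, B raises IndexError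
import Mathlib
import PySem

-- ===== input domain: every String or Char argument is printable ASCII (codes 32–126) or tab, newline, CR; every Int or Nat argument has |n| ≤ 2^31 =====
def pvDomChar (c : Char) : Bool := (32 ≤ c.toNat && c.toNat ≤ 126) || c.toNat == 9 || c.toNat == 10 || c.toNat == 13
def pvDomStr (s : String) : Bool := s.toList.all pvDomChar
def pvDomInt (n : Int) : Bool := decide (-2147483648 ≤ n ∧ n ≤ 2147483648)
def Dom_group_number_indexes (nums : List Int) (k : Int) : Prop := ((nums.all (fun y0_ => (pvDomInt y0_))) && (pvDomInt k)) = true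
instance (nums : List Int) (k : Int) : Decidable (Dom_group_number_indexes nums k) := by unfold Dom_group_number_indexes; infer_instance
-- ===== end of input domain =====

-- B replaces A's per-item min()+index() scan of the sums list by a priority
-- queue kept as a list sorted ascending by (sum, group index); same results.


-- ===== PORT A =====
-- one loop step of A: find the group with the smallest sum (min then index), append, add
def gniStepA (st : List (List Int) × List Int) (p : Int × Int) : List (List Int) × List Int :=
  match PySem.List.min? st.2 (fun s => s) with
  | none => st
  | some m =>
    match PySem.List.index? st.2 m with
    | none => st
    | some g => (st.1.modify g (fun grp => grp ++ [p.1]), st.2.modify g (fun s => s + p.2))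

def group_number_indexes (nums : List Int) (k : Int) : List (List Int) :=
  let indexed := PySem.List.sorted (PySem.List.enumerate nums) (fun x => x.2) true
  (indexed.foldl gniStepA (List.replicate k.toNat [], List.replicate k.toNat 0)).1

-- ===== PORT B =====
-- tuple comparison (sum, group) < (sum, group): Python's lexicographic <
def gniLexLt (a b : Int × Int) : Bool := a.1 < b.1 || (a.1 == b.1 && a.2 < b.2)

-- Source B's insertion loop: insert x before the first element not < x
def gniInsert (q : List (Int × Int)) (x : Int × Int) : List (Int × Int) :=
  match q with
  | [] => [x]
  | y :: t => if gniLexLt y x then y :: gniInsert t x else x :: y :: t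

-- one loop step of B: pop the queue head, append, reinsert the updated pair in order
def gniStepB (st : List (List Int) × List (Int × Int)) (p : Int × Int) :
    List (List Int) × List (Int × Int) :=
  match st.2 with
  | [] => st
  | (s, g) :: rest => (st.1.modify g.toNat (fun grp => grp ++ [p.1]), gniInsert rest (s + p.2, g))

def group_number_indexes_alt (nums : List Int) (k : Int) : List (List Int) :=
  let indexed := PySem.List.sorted (PySem.List.enumerate nums) (fun x => x.2) true
  (indexed.foldl gniStepB
    (List.replicate k.toNat [], (List.range k.toNat).map (fun g : Nat => ((0 : Int), (g : Int))))).1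

-- ===== PRECONDITION & SPEC =====
-- Pre_ excludes exactly the inputs where A raises: with nums nonempty and k ≤ 0 A's
-- min() gets an empty sequence (ValueError); B's queue pop raises there too.
def Pre_group_number_indexes (nums : List Int) (k : Int) : Prop := 0 < k ∨ nums = []
instance (nums : List Int) (k : Int) : Decidable (Pre_group_number_indexes nums k) := by unfold Pre_group_number_indexes; infer_instance
def pvWitness_group_number_indexes : List Int × Int := ([5, 3, 8, 1, 2, 7], 3)

def Spec_group_number_indexes (nums : List Int) (k : Int) (out : List (List Int)) : Prop := out = group_number_indexes_alt nums k
instance (nums : List Int) (k : Int) (out : List (List Int)) : Decidable (Spec_group_number_indexes nums k out) := by unfold Spec_group_number_indexes; infer_instance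

-- ===== CLAIM (what is proved, stated in full; the proofs are below) =====
def Claim_equal_group_number_indexes : Prop := ∀ (nums : List Int) (k : Int), Dom_group_number_indexes nums k → Pre_group_number_indexes nums k → Spec_group_number_indexes nums k (group_number_indexes nums k)

-- ===== LEMMAS AND PROOFS =====

-- lexicographic order on (sum, group) as a Prop
def gniLexP (a b : Int × Int) : Prop := a.1 < b.1 ∨ (a.1 = b.1 ∧ a.2 < b.2)

lemma gniLexLt_iff (a b : Int × Int) : gniLexLt a b = true ↔ gniLexP a b := by
  simp [gniLexLt, gniLexP]

lemma gniLexP_trans {a b c : Int × Int} (h1 : gniLexP a b) (h2 : gniLexP b c) : gniLexP a c := by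
  rcases h1 with h1 | ⟨h1, h1'⟩ <;> rcases h2 with h2 | ⟨h2, h2'⟩ <;>
    simp only [gniLexP] <;> omega

lemma gniLexP_of_not_of_ne {a b : Int × Int} (h : ¬ gniLexP a b) (hne : a.2 ≠ b.2) :
    gniLexP b a := by
  simp only [gniLexP, not_or, not_and] at h ⊢; omega

lemma gniInsert_perm (q : List (Int × Int)) (x : Int × Int) :
    (gniInsert q x).Perm (x :: q) := by
  induction q with
  | nil => simp [gniInsert]
  | cons y t ih =>
    simp only [gniInsert]
    split
    · exact ((ih.cons y).trans (List.Perm.swap x y t))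
    · exact List.Perm.refl _

lemma gniInsert_pairwise (q : List (Int × Int)) (x : Int × Int)
    (hq : q.Pairwise gniLexP) (hne : ∀ y ∈ q, y.2 ≠ x.2) :
    (gniInsert q x).Pairwise gniLexP := by
  induction q with
  | nil => simp [gniInsert]
  | cons y t ih =>
    rcases List.pairwise_cons.1 hq with ⟨hy, ht⟩
    simp only [gniInsert]
    split
    · rename_i hlt
      refine List.pairwise_cons.2 ⟨?_, ih ht (fun z hz => hne z (List.mem_cons_of_mem y hz))⟩
      intro z hz
      rcases List.mem_cons.1 ((gniInsert_perm t x).mem_iff.1 hz) with hzx | hz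
      · exact hzx ▸ (gniLexLt_iff y x).1 hlt
      · exact hy z hz
    · rename_i hnlt
      have hxy : gniLexP x y := by
        refine gniLexP_of_not_of_ne (fun h => hnlt ((gniLexLt_iff y x).2 h)) ?_
        exact fun h => hne y List.mem_cons_self h
      refine List.pairwise_cons.2 ⟨?_, hq⟩
      intro z hz
      rcases List.mem_cons.1 hz with hzy | hz
      · exact hzy ▸ hxy
      · exact gniLexP_trans hxy (hy z hz)

-- the multiset of (sum, group-index) pairs of a sums list
def gniPairs (sums : List Int) : List (Int × Int) :=
  (PySem.List.enumerate sums 0).map (fun p => (p.2, p.1))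

lemma gniPairs_length (sums : List Int) : (gniPairs sums).length = sums.length := by
  simp [gniPairs, PySem.List.length_enumerate]

lemma gniPairs_getElem (sums : List Int) (j : Nat) (h : j < sums.length) :
    (gniPairs sums)[j]'(by simp [gniPairs_length, h]) = (sums[j], (j : Int)) := by
  simp [gniPairs, PySem.List.getElem_enumerate]

lemma gniPairs_mem {sums : List Int} {s g : Int} (h : (s, g) ∈ gniPairs sums) :
    ∃ (j : Nat) (hj : j < sums.length), g = (j : Int) ∧ s = sums[j] := by
  simp only [gniPairs, List.mem_map] at h
  rcases h with ⟨p, hp, he⟩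
  rcases (PySem.List.mem_enumerate_iff _ _ _).1 hp with ⟨j, hj, rfl⟩
  exact ⟨j, hj, by simp at he; omega, by simp_all⟩

lemma gniPairs_snd_lt (sums : List Int) :
    (gniPairs sums).Pairwise (fun a b => a.2 < b.2) := by
  have := PySem.List.pairwise_lt_enumerate sums 0
  exact List.pairwise_map.2 (by simpa using this)

-- replacing position j of sums replaces position j of its pairs
lemma gniPairs_modify (sums : List Int) (j : Nat) (h : j < sums.length) (f : Int → Int) :
    gniPairs (sums.modify j f) = (gniPairs sums).set j (f sums[j], (j : Int)) := by
  apply List.ext_getElem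
  · simp [gniPairs_length]
  · intro i h1 h2
    have hi : i < sums.length := by simpa [gniPairs_length] using h1
    rw [List.getElem_set]
    by_cases hij : j = i
    · subst hij
      rw [gniPairs_getElem (sums.modify j f) j (by simpa using hi), if_pos rfl,
        List.getElem_modify, if_pos rfl]
    · rw [gniPairs_getElem (sums.modify j f) i (by simpa using hi), if_neg hij,
        List.getElem_modify, if_neg hij, gniPairs_getElem sums i hi]

-- a list is its j-th element plus the rest, up to permutation
lemma perm_getElem_eraseIdx {α : Type} (l : List α) (j : Nat) (h : j < l.length) :
    l.Perm (l[j] :: l.eraseIdx j) := by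
  conv_lhs => rw [← List.take_append_drop j l, ← List.getElem_cons_drop h]
  rw [List.eraseIdx_eq_take_drop_succ]
  exact List.perm_middle

lemma perm_set_eraseIdx {α : Type} (l : List α) (j : Nat) (h : j < l.length) (b : α) :
    (l.set j b).Perm (b :: l.eraseIdx j) := by
  rw [List.set_eq_take_append_cons_drop, if_pos h, List.eraseIdx_eq_take_drop_succ]
  exact List.perm_middle

-- min? with identity key returns exactly the minimum value
lemma min?_id_eq {sums : List Int} {s : Int} (hs : s ∈ sums) (hmin : ∀ y ∈ sums, s ≤ y) :
    PySem.List.min? sums (fun x => x) = some s := by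
  cases hq : PySem.List.min? sums (fun x => x) with
  | none =>
    rw [PySem.List.min?_eq_none_iff] at hq
    subst hq; simp at hs
  | some m =>
    have hm := PySem.List.min?_mem hq
    have h1 := PySem.List.min?_isMin hq s hs
    have h2 := hmin m hm
    simp only [Option.some.injEq]
    omega

-- first-occurrence characterization of index?
lemma index?_of_first {sums : List Int} {s : Int} {j : Nat} (hj : j < sums.length)
    (he : sums[j] = s) (hfirst : ∀ i, i < j → ∀ (hi : i < sums.length), sums[i] ≠ s) :
    PySem.List.index? sums s = some j := by
  rw [PySem.List.index?_eq_some_iff]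
  refine ⟨sums.take j, sums.drop (j + 1), ?_, by simp [hj.le], ?_⟩
  · conv_lhs => rw [← List.take_append_drop j sums, ← List.getElem_cons_drop hj]
    rw [he]
  · intro hmem
    rcases List.mem_take_iff_getElem.1 hmem with ⟨i, hi, hie⟩
    have hij : i < j := by omega
    exact hfirst i hij (by omega) hie

-- the head of the sorted queue is A's (min sum, first argmin)
lemma queue_head {sums : List Int} {q rest : List (Int × Int)} {s g : Int}
    (hperm : q.Perm (gniPairs sums)) (hsort : q.Pairwise gniLexP)
    (hq : q = (s, g) :: rest) :
    ∃ (j : Nat) (hj : j < sums.length), g = (j : Int) ∧ s = sums[j] ∧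
      PySem.List.min? sums (fun x => x) = some s ∧
      PySem.List.index? sums s = some j := by
  subst hq
  have hhead : (s, g) ∈ gniPairs sums := hperm.mem_iff.1 List.mem_cons_self
  rcases gniPairs_mem hhead with ⟨j, hj, hg, hs⟩
  have hle : ∀ p ∈ gniPairs sums, gniLexP (s, g) p ∨ p = (s, g) := by
    intro p hp
    rcases List.mem_cons.1 (hperm.mem_iff.2 hp) with h | h
    · exact Or.inr h
    · exact Or.inl ((List.pairwise_cons.1 hsort).1 p h)
  have hminv : ∀ y ∈ sums, s ≤ y := by
    intro y hy
    rcases List.mem_iff_getElem.1 hy with ⟨i, hi, rfl⟩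
    have hp : (sums[i], (i : Int)) ∈ gniPairs sums := by
      rw [← gniPairs_getElem sums i hi]
      exact List.getElem_mem _
    rcases hle _ hp with h | h
    · rcases h with h | ⟨h, _⟩
      · exact le_of_lt h
      · exact le_of_eq h
    · rw [Prod.ext_iff] at h
      exact le_of_eq h.1.symm
  refine ⟨j, hj, hg, hs, min?_id_eq (hs ▸ List.getElem_mem hj) hminv, ?_⟩
  refine index?_of_first hj hs.symm ?_
  intro i hij hi hie
  have hp : (sums[i], (i : Int)) ∈ gniPairs sums := by
    rw [← gniPairs_getElem sums i hi]; exact List.getElem_mem _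
  rcases hle _ hp with h | h
  · rcases h with h | ⟨_, h2⟩
    · omega
    · rw [hg] at h2; exact absurd (by exact_mod_cast h2) (by omega)
  · rw [Prod.ext_iff] at h
    have : (i : Int) = g := h.2
    omega

-- the loop invariant: B's queue is a sorted permutation of A's (sum, index) pairs
lemma gni_loop (L : List (Int × Int)) :
    ∀ (groups : List (List Int)) (sums : List Int) (q : List (Int × Int)),
    sums ≠ [] → q.Perm (gniPairs sums) → q.Pairwise gniLexP →
    (L.foldl gniStepA (groups, sums)).1 = (L.foldl gniStepB (groups, q)).1 := by
  induction L with
  | nil => intro groups sums q _ _ _; rfl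
  | cons p L ih =>
    intro groups sums q hne hperm hsort
    cases hq : q with
    | nil =>
      exfalso
      rw [hq] at hperm
      have hlen := hperm.length_eq
      simp [gniPairs_length] at hlen
      exact hne (List.eq_nil_of_length_eq_zero hlen.symm)
    | cons hd rest =>
      obtain ⟨s, g⟩ := hd
      rcases queue_head hperm hsort hq with ⟨j, hj, hg, hs, hmin, hidx⟩
      have hidx' : List.idxOf? s sums = some j := by simpa using hidx
      have hstepA : gniStepA (groups, sums) p
          = (groups.modify j (fun grp => grp ++ [p.1]), sums.modify j (fun x => x + p.2)) := by
        simp [gniStepA, hmin, hidx']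
      have hgt : g.toNat = j := by omega
      have hstepB : gniStepB (groups, (s, g) :: rest) p
          = (groups.modify j (fun grp => grp ++ [p.1]), gniInsert rest (s + p.2, g)) := by
        simp [gniStepB, hgt]
      rw [List.foldl_cons, List.foldl_cons, hstepA, hstepB]
      -- re-establish the invariant for the updated state
      set sums' := sums.modify j (fun x => x + p.2) with hsums'
      have hlen : sums'.length = sums.length := by simp [hsums']
      have hne' : sums' ≠ [] := by
        intro h; apply hne; apply List.eq_nil_of_length_eq_zero
        have := congrArg List.length h
        simpa [hlen] using this
      have hjP : j < (gniPairs sums).length := by rw [gniPairs_length]; exact hj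
      have h0 : (gniPairs sums).Perm ((s, g) :: (gniPairs sums).eraseIdx j) := by
        have h := perm_getElem_eraseIdx (gniPairs sums) j hjP
        rw [gniPairs_getElem sums j hj] at h
        rw [hs, hg]; exact h
      have hperm_rest : rest.Perm ((gniPairs sums).eraseIdx j) :=
        ((hq ▸ hperm).trans h0).cons_inv
      have hperm' : (gniInsert rest (s + p.2, g)).Perm (gniPairs sums') := by
        refine (gniInsert_perm rest _).trans ?_
        rw [hsums', gniPairs_modify sums j hj]
        refine ((hperm_rest.cons (s + p.2, g)).trans ?_)
        rw [hs, hg]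
        exact (perm_set_eraseIdx (gniPairs sums) j hjP _).symm
      have hsort_rest : rest.Pairwise gniLexP := (List.pairwise_cons.1 (hq ▸ hsort)).2
      have hsnd_ne : ∀ y ∈ rest, y.2 ≠ (s + p.2, g).2 := by
        have hnodupP : ((gniPairs sums).map (fun a : Int × Int => a.2)).Nodup :=
          (List.pairwise_map.2 (gniPairs_snd_lt sums)).imp ne_of_lt
        have hnodup : (((s, g) :: rest).map (fun a : Int × Int => a.2)).Nodup :=
          ((hq ▸ hperm).map (fun a : Int × Int => a.2)).symm.nodup hnodupP
        rw [List.map_cons, List.nodup_cons] at hnodup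
        intro y hy hcontra
        exact hnodup.1 (by rw [← hcontra] at *; exact List.mem_map_of_mem hy)
      have hsort' : (gniInsert rest (s + p.2, g)).Pairwise gniLexP :=
        gniInsert_pairwise rest _ hsort_rest hsnd_ne
      exact ih _ sums' _ hne' hperm' hsort'

-- the initial queue equals the initial pairs and is sorted
lemma gniPairs_replicate (n : Nat) :
    gniPairs (List.replicate n (0 : Int)) = (List.range n).map (fun g : Nat => ((0 : Int), (g : Int))) := by
  apply List.ext_getElem
  · simp [gniPairs_length]
  · intro i h1 h2
    have hi : i < n := by simpa [gniPairs_length] using h1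
    rw [gniPairs_getElem _ _ (by simpa using hi)]
    simp

lemma init_sorted (n : Nat) :
    ((List.range n).map (fun g : Nat => ((0 : Int), (g : Int)))).Pairwise gniLexP := by
  refine List.pairwise_map.2 ?_
  refine (List.pairwise_lt_range (n := n)).imp ?_
  intro a b h
  exact Or.inr ⟨rfl, by simp only []; exact_mod_cast h⟩

-- ===== VERDICT (by name: the statement is the Claim_ definition above) =====
theorem group_number_indexes_spec : Claim_equal_group_number_indexes := by
  intro nums k _ hpre
  unfold Spec_group_number_indexes group_number_indexes group_number_indexes_alt
  rcases hpre with hk | hnil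
  · have hn : List.replicate k.toNat (0 : Int) ≠ [] := by
      simp only [ne_eq, List.replicate_eq_nil_iff]
      omega
    exact gni_loop _ _ _ _ hn (by rw [gniPairs_replicate]) (init_sorted k.toNat)
  · subst hnil
    rfl
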